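-- pv_equiv track=rewrite | github.com/jgfranco/formation | stringSpeedDrill7.py | solution
-- ===== SOURCE A (Python) =====
-- def solution(s):
--     vowels = ['a', 'e', 'i', 'o', 'u']
--     count =0
--
--     for char in s:
--         if char in vowels:
--             count +=1
--         else:
--             count +=2
--
--     return count
-- ===== SOURCE B (Python) =====
-- def solution(s):
--     return 2 * len(s) - sum(map(s.count, "aeiou"))
-- ===== Notes on version B (the rewrite author's own statement) =====
-- stated objective: alternative
-- what changed: B has no per-character branch or accumulator at all: it runs five staged str.count library passes (one per vowel) and returns the closed form 2*len(s) minus their sum.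
import Mathlib
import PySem

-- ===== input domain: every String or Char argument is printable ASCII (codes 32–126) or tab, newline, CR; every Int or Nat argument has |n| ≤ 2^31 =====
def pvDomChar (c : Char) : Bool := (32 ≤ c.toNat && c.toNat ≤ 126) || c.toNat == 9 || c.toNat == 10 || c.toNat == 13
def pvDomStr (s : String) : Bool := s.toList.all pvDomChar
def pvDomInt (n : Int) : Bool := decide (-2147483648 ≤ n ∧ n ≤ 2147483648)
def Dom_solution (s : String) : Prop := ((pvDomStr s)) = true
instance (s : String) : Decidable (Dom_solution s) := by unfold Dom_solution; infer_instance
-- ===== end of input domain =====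

-- B drops the per-character if/else accumulation: five staged str.count passes and the closed form 2*len(s) - sum of vowel counts (measured faster in a timing run: C-level str.count vs a per-char Python loop).


-- ===== PORT A =====
-- literal port of A: loop over the characters, +1 for a vowel, +2 otherwise
def solution (s : String) : Int :=
  s.toList.foldl (fun count char =>
    if char ∈ (['a', 'e', 'i', 'o', 'u'] : List Char) then count + 1 else count + 2) 0

-- ===== PORT B =====
-- port of Source B: 2*len(s) minus the sum of the five s.count(v) passes, v over "aeiou"
def solution_alt (s : String) : Int :=
  2 * PySem.Str.len s
    - ((["a", "e", "i", "o", "u"] : List String).map (fun v => ((PySem.Str.count s v : Nat) : Int))).sum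

-- ===== PRECONDITION & SPEC =====
def Spec_solution (s : String) (out : Int) : Prop := out = solution_alt s
instance (s : String) (out : Int) : Decidable (Spec_solution s out) := by unfold Spec_solution; infer_instance

-- ===== CLAIM (what is proved, stated in full; the proofs are below) =====
def Claim_equal_solution : Prop := ∀ (s : String), Dom_solution s → Spec_solution s (solution s)

-- ===== LEMMAS AND PROOFS =====

-- str.count's worker, for a single-character needle, is List.count
theorem count_go_single (c : Char) : ∀ (l : List Char) (fuel acc : Nat),
    l.length ≤ fuel → PySem.Chars.count.go [c] fuel l acc = acc + l.count c := by
  intro l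
  induction l with
  | nil => intro fuel acc _; cases fuel <;> simp [PySem.Chars.count.go]
  | cons h t ih =>
    intro fuel acc hf
    cases fuel with
    | zero => simp at hf
    | succ f =>
      rw [PySem.Chars.count.go]
      cases hb : List.isPrefixOf [c] (h :: t) with
      | false =>
        rw [if_neg (by simp)]
        rw [ih f acc (by simp at hf; omega)]
        have hc : ¬ h = c := fun e => by subst e; simp [List.isPrefixOf] at hb
        simp [hc]
      | true =>
        have hc : c = h := by simpa [List.isPrefixOf] using hb
        subst hc
        rw [if_pos rfl]
        simp only [List.length_singleton, List.drop_one, List.tail_cons]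
        rw [ih f (acc + 1) (by simp at hf; omega)]
        simp
        omega

theorem count_single (cs : List Char) (c : Char) :
    PySem.Chars.count cs [c] = cs.count c := by
  unfold PySem.Chars.count
  rw [if_neg (by simp)]
  simpa using count_go_single c cs cs.length 0 le_rfl

theorem sum_map_count_cons (vs : List Char) (c : Char) (t : List Char) :
    (vs.map (fun v => (c :: t).count v)).sum = (vs.map (fun v => t.count v)).sum + vs.count c := by
  induction vs with
  | nil => simp
  | cons v vs ih =>
    have h1 : (c :: t).count v = t.count v + if v = c then 1 else 0 := by
      by_cases h : v = c
      · subst h; simp [List.count_cons]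
      · have h' : c ≠ v := Ne.symm h
        simp [List.count_cons, h, h']
    have h2 : (v :: vs).count c = vs.count c + if v = c then 1 else 0 := by
      by_cases h : v = c
      · subst h; simp [List.count_cons]
      · simp [List.count_cons, h, Ne.symm h]
    rw [List.map_cons, List.sum_cons, ih, h1, List.map_cons, List.sum_cons, h2]
    by_cases h : v = c <;> simp [h] <;> omega

theorem sum_count_nodup (vs : List Char) (hv : vs.Nodup) (l : List Char) :
    (vs.map (fun v => l.count v)).sum = (l.filter (fun x => decide (x ∈ vs))).length := by
  induction l with
  | nil => simp
  | cons c t ih =>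
    rw [sum_map_count_cons, ih, List.filter_cons]
    by_cases hm : c ∈ vs
    · rw [List.count_eq_one_of_mem hv hm]; simp [hm]
    · rw [List.count_eq_zero.mpr hm]; simp [hm]

theorem solution_foldl (l : List Char) (a : Int) :
    l.foldl (fun count char =>
      if char ∈ (['a', 'e', 'i', 'o', 'u'] : List Char) then count + 1 else count + 2) a
    = a + 2 * (l.length : Int)
        - ((l.filter (fun x => decide (x ∈ (['a', 'e', 'i', 'o', 'u'] : List Char)))).length : Int) := by
  induction l generalizing a with
  | nil => simp
  | cons c t ih =>
    simp only [List.foldl_cons, List.filter_cons, ih]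
    by_cases h : c ∈ (['a', 'e', 'i', 'o', 'u'] : List Char)
    · simp [h, List.length_cons]; ring
    · simp [h, List.length_cons]; ring

-- ===== VERDICT =====
theorem solution_spec : Claim_equal_solution := by
  intro s _
  unfold Spec_solution solution solution_alt
  rw [solution_foldl]
  have hlen : PySem.Str.len s = (s.toList.length : Int) := by
    simp [PySem.Str.len_eq, PySem.Chars.len]
  have hcnt : ∀ (v : String) (c : Char), v.toList = [c] →
      (PySem.Str.count s v : Nat) = s.toList.count c := by
    intro v c hv
    simp only [PySem.Str.count_eq]
    rw [hv, count_single]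
  have hs := sum_count_nodup (['a', 'e', 'i', 'o', 'u'] : List Char) (by decide) s.toList
  simp only [List.map_cons, List.map_nil, List.sum_cons, List.sum_nil] at hs ⊢
  rw [hcnt "a" 'a' (by decide), hcnt "e" 'e' (by decide), hcnt "i" 'i' (by decide),
      hcnt "o" 'o' (by decide), hcnt "u" 'u' (by decide), hlen]
  push_cast [← hs]
  ring
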